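-- pv_equiv track=rewrite | github.com/DfX-NYUAD/OptiLock | src/OptiLock_SCOPE_Searching.py | split_dictionary_small
-- ===== SOURCE A (Python) =====
-- def split_dictionary(data, num_parts):
--     # Calculate the number of items each part should have
--     total_items = len(data)
--     items_per_part = total_items // num_parts
--     remainder = total_items % num_parts
--
--     # Create a list to store the smaller dictionaries
--     split_dicts = [{} for _ in range(num_parts)]
--
--     # Initialize an index for tracking which part to add to
--     part_index = 0
--     item_count = 0
--
--     # Iterate over the original dictionary and distribute the items
--     for idx, (key, value) in enumerate(data.items()):
--         # Add the key-value pair to the appropriate smaller dictionary with reset key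
--         split_dicts[part_index][item_count] = value
--         item_count += 1
--
--         # Move to the next dictionary if the current one is full
--         if item_count == items_per_part + (1 if part_index < remainder else 0):
--             part_index += 1
--             item_count = 0
--
--     return split_dicts
--
-- def split_dictionary_small(dict_list, key_size):
--     split_dicts = []
--     for dict_temp in dict_list:
--         if len(dict_temp) > 200:
--             split_dict = split_dictionary(dict_temp, int(len(dict_temp)//(key_size*5)))
--             split_dicts += split_dict
--         else:
--             split_dicts.append(dict_temp)
--     return split_dicts
-- ===== SOURCE B (Python) =====
-- def _split_chunks(data, num_parts):
--     items = list(data.items())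
--     total = len(items)
--     base = total // num_parts
--     rem = total % num_parts
--     sizes = [base + (1 if i < rem else 0) for i in range(num_parts)]
--     result = []
--     start = 0
--     for size in sizes:
--         chunk = items[start:start + size]
--         result.append({j: v for j, (_k, v) in enumerate(chunk)})
--         start += size
--     return result
--
-- def split_dictionary_small(dict_list, key_size):
--     split_dicts = []
--     for dict_temp in dict_list:
--         if len(dict_temp) > 200:
--             split_dicts += _split_chunks(dict_temp, int(len(dict_temp) // (key_size * 5)))
--         else:
--             split_dicts.append(dict_temp)
--     return split_dicts
-- ===== Notes on version B (the rewrite author's own statement) =====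
-- stated objective: alternative
-- what changed: The inner split_dictionary no longer simulates a per-item part_index/item_count state machine that fills dicts one item at a time; B precomputes all chunk sizes (base = total//num_parts plus one for the first total%num_parts parts) and slices consecutive chunks out of list(data.items()), re-keying each chunk with a dict comprehension.
import Mathlib
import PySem

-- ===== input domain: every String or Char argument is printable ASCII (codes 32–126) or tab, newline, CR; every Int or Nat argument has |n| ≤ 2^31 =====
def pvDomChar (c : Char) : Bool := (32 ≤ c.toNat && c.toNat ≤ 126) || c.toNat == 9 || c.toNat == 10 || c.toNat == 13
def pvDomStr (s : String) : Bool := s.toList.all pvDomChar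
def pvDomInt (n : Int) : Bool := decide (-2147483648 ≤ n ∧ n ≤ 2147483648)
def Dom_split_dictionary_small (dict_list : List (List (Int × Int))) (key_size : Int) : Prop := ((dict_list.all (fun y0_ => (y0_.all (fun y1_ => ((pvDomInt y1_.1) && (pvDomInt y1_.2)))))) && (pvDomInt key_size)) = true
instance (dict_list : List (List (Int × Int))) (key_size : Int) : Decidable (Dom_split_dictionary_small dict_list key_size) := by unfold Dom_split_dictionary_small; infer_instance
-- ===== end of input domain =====

-- B replaces A's per-item part_index/item_count state machine by computing all chunk sizes
-- up front and slicing consecutive chunks; same O(n) cost (objective: alternative).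

-- ===== PORT A =====
-- inner helper split_dictionary of A, transliterated (parts are PySem.Dicts, returned as items lists)
def split_dictionary_py (data : List (Int × Int)) (num_parts : Int) : List (List (Int × Int)) :=
  let total : Int := data.length
  let items_per_part := PySem.Int.floordiv total num_parts
  let remainder := PySem.Int.mod total num_parts
  let split_dicts : List (PySem.Dict Int Int) :=
    (PySem.List.pyRange 0 num_parts 1).map (fun _ => PySem.Dict.empty)
  let fin := (PySem.List.enumerate data).foldl
    (fun (st : List (PySem.Dict Int Int) × Int × Int) p =>
      let parts := st.1
      let part_index := st.2.1
      let item_count := st.2.2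
      -- split_dicts[part_index][item_count] = value  (IndexError when part_index out of range is outside Pre_)
      let parts' := parts.modify part_index.toNat (fun d => d.insert item_count p.2.2)
      if item_count + 1 = items_per_part + (if part_index < remainder then 1 else 0) then
        (parts', part_index + 1, 0)
      else
        (parts', part_index, item_count + 1))
    (split_dicts, 0, 0)
  fin.1.map PySem.Dict.items

def split_dictionary_small (dict_list : List (List (Int × Int))) (key_size : Int) : List (List (Int × Int)) :=
  dict_list.foldl
    (fun split_dicts dict_temp =>
      if (200 : Int) < dict_temp.length then
        split_dicts ++ split_dictionary_py dict_temp
          (PySem.Int.floordiv (dict_temp.length : Int) (key_size * 5))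
      else
        split_dicts ++ [dict_temp]) []

-- ===== PORT B =====
-- inner helper _split_chunks of B, transliterated
def split_chunks (data : List (Int × Int)) (num_parts : Int) : List (List (Int × Int)) :=
  let total : Int := data.length
  let base := PySem.Int.floordiv total num_parts
  let rem := PySem.Int.mod total num_parts
  let sizes := (PySem.List.pyRange 0 num_parts 1).map (fun i => base + if i < rem then 1 else 0)
  (sizes.foldl
    (fun (st : List (List (Int × Int)) × Int) size =>
      let chunk := PySem.List.slice data (some st.2) (some (st.2 + size))
      (st.1 ++ [(PySem.List.enumerate chunk).map (fun p => (p.1, p.2.2))], st.2 + size))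
    ([], 0)).1

def split_dictionary_small_alt (dict_list : List (List (Int × Int))) (key_size : Int) : List (List (Int × Int)) :=
  dict_list.foldl
    (fun split_dicts dict_temp =>
      if (200 : Int) < dict_temp.length then
        split_dicts ++ split_chunks dict_temp
          (PySem.Int.floordiv (dict_temp.length : Int) (key_size * 5))
      else
        split_dicts ++ [dict_temp]) []

-- ===== PRECONDITION & SPEC =====
-- Pre_ is exactly where A returns: for every dict longer than 200, key_size must be positive and
-- 5*key_size ≤ len (else num_parts ≤ 0 and A raises ZeroDivisionError or IndexError).
def Pre_split_dictionary_small (dict_list : List (List (Int × Int))) (key_size : Int) : Prop :=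
  ∀ d ∈ dict_list, (200 : Int) < d.length → 0 < key_size ∧ 5 * key_size ≤ (d.length : Int)
instance (dict_list : List (List (Int × Int))) (key_size : Int) : Decidable (Pre_split_dictionary_small dict_list key_size) := by unfold Pre_split_dictionary_small; infer_instance

def pvWitness_split_dictionary_small : (List (List (Int × Int))) × Int := ([[(1, 2), (3, 4)]], 1)

def Spec_split_dictionary_small (dict_list : List (List (Int × Int))) (key_size : Int) (out : List (List (Int × Int))) : Prop := out = split_dictionary_small_alt dict_list key_size
instance (dict_list : List (List (Int × Int))) (key_size : Int) (out : List (List (Int × Int))) : Decidable (Spec_split_dictionary_small dict_list key_size out) := by unfold Spec_split_dictionary_small; infer_instance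

-- ===== CLAIM (what is proved, stated in full; the proofs are below) =====
def Claim_equal_split_dictionary_small : Prop := ∀ (dict_list : List (List (Int × Int))) (key_size : Int), Dom_split_dictionary_small dict_list key_size → Pre_split_dictionary_small dict_list key_size → Spec_split_dictionary_small dict_list key_size (split_dictionary_small dict_list key_size)

-- ===== LEMMAS AND PROOFS =====

-- size of part number pi
def pvTgt (ipp rem pi : Int) : Int := ipp + (if pi < rem then 1 else 0)

-- re-keying with fresh keys s, s+1, …
def pvRk (s : Int) (l : List (Int × Int)) : List (Int × Int) :=
  (PySem.List.enumerate l s).map (fun p => (p.1, p.2.2))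

-- the common shape: parts pi, pi+1, … (f of them), each taking its pvTgt-many items
def pvChunks (ipp rem : Int) : Nat → Int → List (Int × Int) → List (List (Int × Int))
  | 0, _, _ => []
  | f + 1, pi, items =>
      pvRk 0 (items.take (pvTgt ipp rem pi).toNat) ::
        pvChunks ipp rem f (pi + 1) (items.drop (pvTgt ipp rem pi).toNat)

-- total capacity of parts pi, …, pi+f-1
def pvSum (ipp rem : Int) : Nat → Int → Int
  | 0, _ => 0
  | f + 1, pi => pvTgt ipp rem pi + pvSum ipp rem f (pi + 1)

theorem pvSum_nonneg (ipp rem : Int) (h : 0 ≤ ipp) : ∀ (f : Nat) (pi : Int), 0 ≤ pvSum ipp rem f pi := by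
  intro f
  induction f with
  | zero => intro pi; simp [pvSum]
  | succ f ih =>
      intro pi
      have := ih (pi + 1)
      simp only [pvSum, pvTgt]
      split <;> omega

theorem pvSum_eq_zero (ipp rem : Int) (h : ipp = 0) : ∀ (f : Nat) (pi : Int), rem ≤ pi → pvSum ipp rem f pi = 0 := by
  intro f
  induction f with
  | zero => intro pi _; simp [pvSum]
  | succ f ih =>
      intro pi hpi
      have := ih (pi + 1) (by omega)
      simp only [pvSum, pvTgt]
      rw [if_neg (by omega)]
      omega

theorem pvSum_closed (ipp rem : Int) : ∀ (f : Nat) (pi : Int), pvSum ipp rem f pi = f * ipp + max 0 (min (rem - pi) f) := by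
  intro f
  induction f with
  | zero => intro pi; simp [pvSum]
  | succ f ih =>
      intro pi
      have := ih (pi + 1)
      simp only [pvSum, pvTgt] at *
      push_cast at *
      have hr : ((f : Int) + 1) * ipp = (f : Int) * ipp + ipp := by ring
      split <;> omega

theorem pvChunks_nil (ipp rem : Int) : ∀ (f : Nat) (pi : Int), pvChunks ipp rem f pi [] = List.replicate f [] := by
  intro f
  induction f with
  | zero => intro pi; simp [pvChunks]
  | succ f ih => intro pi; simp [pvChunks, pvRk, List.replicate, ih]

theorem pv_items_empty : (PySem.Dict.empty : PySem.Dict Int Int).items = [] := rfl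

theorem pv_keys_lt_not_contains (d : PySem.Dict Int Int) (ic : Int) (h : ∀ k ∈ d.keys, k < ic) :
    d.contains ic = false := by
  rw [PySem.Dict.contains_eq_decide_mem_keys]
  simp only [decide_eq_false_iff_not]
  intro hm
  exact absurd (h ic hm) (by omega)

theorem pv_modify_append (l1 l2 : List (PySem.Dict Int Int)) (a : PySem.Dict Int Int)
    (f : PySem.Dict Int Int → PySem.Dict Int Int) :
    (l1 ++ a :: l2).modify l1.length f = l1 ++ f a :: l2 := by
  simp [List.modify_eq_set_getElem?]

-- A's loop over enumerate(data.items()) ignores the index: it is a fold over the values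
theorem pv_fold_enum (stepv : (List (PySem.Dict Int Int) × Int × Int) → (Int × Int) → (List (PySem.Dict Int Int) × Int × Int)) :
    ∀ (xs : List (Int × Int)) (s : Int) (st : List (PySem.Dict Int Int) × Int × Int),
      (PySem.List.enumerate xs s).foldl (fun st p => stepv st p.2) st = xs.foldl stepv st := by
  intro xs
  induction xs with
  | nil => intro s st; simp [PySem.List.enumerate]
  | cons x xs ih => intro s st; rw [PySem.List.enumerate_cons]; simp only [List.foldl_cons]; exact ih _ _

-- the step function of A's inner loop (after pv_fold_enum)
def pvStepA (ipp rem : Int) (st : List (PySem.Dict Int Int) × Int × Int) (x : Int × Int) :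
    List (PySem.Dict Int Int) × Int × Int :=
  let parts' := st.1.modify st.2.1.toNat (fun d => d.insert st.2.2 x.2)
  if st.2.2 + 1 = ipp + (if st.2.1 < rem then 1 else 0) then (parts', st.2.1 + 1, 0)
  else (parts', st.2.1, st.2.2 + 1)

-- invariant of A's inner loop
theorem pv_simA (ipp rem : Int) (hipp : 0 ≤ ipp) :
    ∀ (items : List (Int × Int)) (f : Nat) (front : List (PySem.Dict Int Int)) (pi ic : Int)
      (cur : PySem.Dict Int Int),
      0 ≤ pi → front.length = pi.toNat → 0 ≤ ic → ic < pvTgt ipp rem pi →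
      (∀ k ∈ cur.keys, k < ic) →
      (items.length : Int) = (pvTgt ipp rem pi - ic) + pvSum ipp rem f (pi + 1) →
      ((items.foldl (pvStepA ipp rem) (front ++ cur :: List.replicate f PySem.Dict.empty, pi, ic)).1.map PySem.Dict.items)
        = front.map PySem.Dict.items ++
            (cur.items ++ pvRk ic (items.take (pvTgt ipp rem pi - ic).toNat)) ::
              pvChunks ipp rem f (pi + 1) (items.drop (pvTgt ipp rem pi - ic).toNat) := by
  intro items
  induction items with
  | nil =>
      intro f front pi ic cur hpi hfront hic0 hic hkeys hbud
      have h1 := pvSum_nonneg ipp rem hipp f (pi + 1)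
      simp only [List.length_nil, Nat.cast_zero] at hbud
      omega
  | cons x rest ih =>
      intro f front pi ic cur hpi hfront hic0 hic hkeys hbud
      have hcontains : cur.contains ic = false := pv_keys_lt_not_contains cur ic hkeys
      have hmod : (front ++ cur :: List.replicate f PySem.Dict.empty).modify pi.toNat
          (fun d => d.insert ic x.2) = front ++ cur.insert ic x.2 :: List.replicate f PySem.Dict.empty := by
        rw [← hfront]; exact pv_modify_append _ _ _ _
      have hitems' : (cur.insert ic x.2).items = cur.items ++ [(ic, x.2)] :=
        PySem.Dict.items_insert_of_not_contains cur x.2 hcontains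
      simp only [List.foldl_cons]
      by_cases hadv : ic + 1 = pvTgt ipp rem pi
      · -- the current part is now full
        have hstep : pvStepA ipp rem (front ++ cur :: List.replicate f PySem.Dict.empty, pi, ic) x
            = (front ++ cur.insert ic x.2 :: List.replicate f PySem.Dict.empty, pi + 1, 0) := by
          simp only [pvStepA, hmod, pvTgt] at *
          rw [if_pos (by omega)]
        rw [hstep]
        have htake1 : (pvTgt ipp rem pi - ic).toNat = 1 := by omega
        rw [htake1]
        simp only [List.take_succ_cons, List.take_zero, List.drop_succ_cons, List.drop_zero]
        have hrk : pvRk ic [x] = [(ic, x.2)] := by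
          simp [pvRk, PySem.List.enumerate]
        cases f with
        | zero =>
            -- no parts remain; budget forces rest = []
            have : rest.length = 0 := by
              simp only [pvSum] at hbud
              simp only [List.length_cons] at hbud
              omega
            have hrest : rest = [] := List.length_eq_zero_iff.mp this
            subst hrest
            simp only [List.foldl_nil, List.replicate, pvChunks]
            simp [hitems', hrk]
        | succ f' =>
            cases rest with
            | nil =>
                -- trailing parts stay empty
                simp only [List.foldl_nil, pvChunks_nil]
                simp only [List.map_append, List.map_cons]
                rw [hitems', hrk]
                have hrep : (List.replicate (f' + 1) (PySem.Dict.empty : PySem.Dict Int Int)).map PySem.Dict.items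
                    = List.replicate (f' + 1) [] := by
                  simp [List.map_replicate]; rfl
                simp [hrep]
            | cons w rest' =>
                -- strictly more items: the next part has positive size
                have hbud' : ((w :: rest').length : Int)
                    = (pvTgt ipp rem (pi + 1) - 0) + pvSum ipp rem f' (pi + 1 + 1) := by
                  simp only [pvSum, List.length_cons] at hbud ⊢
                  push_cast at hbud ⊢
                  omega
                have htgt1 : 0 < pvTgt ipp rem (pi + 1) := by
                  by_contra hneg
                  push Not at hneg
                  have htz : pvTgt ipp rem (pi + 1) = 0 := by
                    simp only [pvTgt] at hneg ⊢; split at hneg <;> split <;> omega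
                  have hipp0 : ipp = 0 := by
                    simp only [pvTgt] at htz; split at htz <;> omega
                  have hrle : rem ≤ pi + 1 := by
                    simp only [pvTgt, hipp0] at htz
                    split at htz <;> omega
                  have hz := pvSum_eq_zero ipp rem hipp0 f' (pi + 1 + 1) (by omega)
                  rw [htz, hz] at hbud'
                  simp at hbud'
                  omega
                have := ih f' (front ++ [cur.insert ic x.2]) (pi + 1) 0 PySem.Dict.empty
                  (by omega)
                  (by simp [hfront]; omega)
                  (by omega) htgt1
                  (by intro k hk; simp [PySem.Dict.keys_empty] at hk)
                  (by simpa using hbud')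
                simp only [List.replicate] at this ⊢
                rw [List.append_assoc] at this
                simp only [List.cons_append, List.nil_append] at this
                rw [this]
                simp only [List.map_append, List.map_cons, List.map_nil]
                rw [hitems', hrk]
                simp only [pvChunks]
                simp only [pv_items_empty, List.nil_append, List.append_assoc, List.cons_append]
                norm_num
      · -- the current part is not yet full
        have hstep : pvStepA ipp rem (front ++ cur :: List.replicate f PySem.Dict.empty, pi, ic) x
            = (front ++ cur.insert ic x.2 :: List.replicate f PySem.Dict.empty, pi, ic + 1) := by
          simp only [pvStepA, hmod, pvTgt] at *
          rw [if_neg (by omega)]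
        rw [hstep]
        have hlt : ic + 1 < pvTgt ipp rem pi := by
          simp only [pvTgt] at *; omega
        have := ih f front pi (ic + 1) (cur.insert ic x.2) hpi hfront (by omega) hlt
          (by intro k hk
              rw [PySem.Dict.mem_keys_insert] at hk
              rcases hk with h | h
              · omega
              · have := hkeys k h; omega)
          (by simp only [List.length_cons] at hbud; push_cast at hbud ⊢; omega)
        rw [this]
        have htn : (pvTgt ipp rem pi - ic).toNat = (pvTgt ipp rem pi - (ic + 1)).toNat + 1 := by omega
        rw [htn]
        simp only [List.take_succ_cons, List.drop_succ_cons]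
        have hrkc : pvRk ic (x :: rest.take (pvTgt ipp rem pi - (ic + 1)).toNat)
            = (ic, x.2) :: pvRk (ic + 1) (rest.take (pvTgt ipp rem pi - (ic + 1)).toNat) := by
          simp [pvRk, PySem.List.enumerate_cons]
        rw [hrkc, hitems']
        simp [List.append_assoc]

-- A's inner function computes pvChunks
theorem pv_A_eq_chunks (data : List (Int × Int)) (n : Int) (hn : 1 ≤ n) :
    split_dictionary_py data n
      = pvChunks (PySem.Int.floordiv (data.length : Int) n) (PySem.Int.mod (data.length : Int) n)
          n.toNat 0 data := by
  have hn0 : (0 : Int) < n := by omega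
  set ipp := PySem.Int.floordiv (data.length : Int) n with hi
  set rem := PySem.Int.mod (data.length : Int) n with hr
  have hid : ipp * n + rem = (data.length : Int) := PySem.Int.floordiv_mul_add_mod _ _
  have hrem0 : 0 ≤ rem := PySem.Int.mod_nonneg _ hn0
  have hremlt : rem < n := PySem.Int.mod_lt _ hn0
  have hipp : 0 ≤ ipp := by
    rw [hi, PySem.Int.floordiv_eq_ediv_of_pos hn0]
    exact Int.ediv_nonneg (by positivity) (by omega)
  have hinit : (PySem.List.pyRange 0 n 1).map (fun _ => (PySem.Dict.empty : PySem.Dict Int Int))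
      = List.replicate n.toNat PySem.Dict.empty := by
    rw [List.map_const']
    rw [PySem.List.length_pyRange_one]
    congr 1
    omega
  have hfold := pv_fold_enum (pvStepA ipp rem) data 0
    (List.replicate n.toNat PySem.Dict.empty, 0, 0)
  have h1 : split_dictionary_py data n
      = (data.foldl (pvStepA ipp rem) (List.replicate n.toNat PySem.Dict.empty, 0, 0)).1.map PySem.Dict.items := by
    simp only [split_dictionary_py, hinit, ← hi, ← hr]
    rw [← hfold]
    rfl
  rw [h1]
  cases data with
  | nil =>
      simp only [List.foldl_nil, pvChunks_nil, List.map_replicate]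
      rfl
  | cons x rest =>
      have hlen : (1 : Int) ≤ ((x :: rest).length : Int) := by
        simp only [List.length_cons]; push_cast; omega
      have htgt0 : 0 < pvTgt ipp rem 0 := by
        by_cases hz : ipp = 0
        · have h0 : ipp * n = 0 := by rw [hz]; ring
          have : rem = ((x :: rest).length : Int) := by omega
          simp only [pvTgt, hz]
          rw [if_pos (by omega)]
          omega
        · simp only [pvTgt]; split <;> omega
      have hf : n.toNat = (n.toNat - 1) + 1 := by omega
      have hrep : List.replicate n.toNat (PySem.Dict.empty : PySem.Dict Int Int)
          = [] ++ PySem.Dict.empty :: List.replicate (n.toNat - 1) PySem.Dict.empty := by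
        rw [List.nil_append, hf]; rfl
      have hbud : (((x :: rest).length : Int)) = (pvTgt ipp rem 0 - 0) + pvSum ipp rem (n.toNat - 1) (0 + 1) := by
        simp only [zero_add, sub_zero]
        have hc := pvSum_closed ipp rem (n.toNat - 1) 1
        have hmm : max 0 (min (rem - 1) ((n.toNat - 1 : Nat) : Int)) = max 0 (min (rem - 1) (n - 1)) := by
          congr 1; omega
        have hmul : ((n.toNat - 1 : Nat) : Int) * ipp = (n - 1) * ipp := by
          congr 1; omega
        rw [hc, hmm, hmul]
        have hr2 : (n - 1) * ipp = n * ipp - ipp := by ring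
        have hr3 : n * ipp = ipp * n := by ring
        simp only [pvTgt]
        split <;> omega
      have := pv_simA ipp rem hipp (x :: rest) (n.toNat - 1) [] 0 0 PySem.Dict.empty
        le_rfl rfl le_rfl htgt0 (by intro k hk; simp [PySem.Dict.keys_empty] at hk) hbud
      rw [hrep, this]
      rw [show pvChunks ipp rem n.toNat 0 (x :: rest) = pvChunks ipp rem ((n.toNat - 1) + 1) 0 (x :: rest) from by rw [← hf]]
      simp only [pvChunks, List.map_nil, List.nil_append, sub_zero, zero_add]
      rfl

-- B's loop over sizes, with the running start offset abstracted
theorem pv_foldB (data : List (Int × Int)) (ipp rem : Int) (hipp : 0 ≤ ipp) :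
  ∀ (f : Nat) (pi : Int) (acc : List (List (Int × Int))) (start : Int), 0 ≤ start →
  (((PySem.List.pyRange pi (pi + (f : Int)) 1).map (fun i => ipp + if i < rem then 1 else 0)).foldl
     (fun (st : List (List (Int × Int)) × Int) size =>
        (st.1 ++ [(PySem.List.enumerate (PySem.List.slice data (some st.2) (some (st.2 + size)))).map (fun p => (p.1, p.2.2))], st.2 + size))
     (acc, start)).1
  = acc ++ pvChunks ipp rem f pi (data.drop start.toNat) := by
  intro f
  induction f with
  | zero =>
      intro pi acc start h
      rw [PySem.List.pyRange_one_eq_nil (by push_cast; omega)]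
      simp [pvChunks]
  | succ f ih =>
      intro pi acc start hst
      rw [PySem.List.pyRange_one_cons (by push_cast; omega)]
      simp only [List.map_cons, List.foldl_cons]
      have htgt : (ipp + if pi < rem then 1 else 0) = pvTgt ipp rem pi := rfl
      have htgt0 : 0 ≤ pvTgt ipp rem pi := by simp only [pvTgt]; split <;> omega
      have hslice : PySem.List.slice data (some start) (some (start + (ipp + if pi < rem then 1 else 0)))
          = (data.drop start.toNat).take (pvTgt ipp rem pi).toNat := by
        rw [PySem.List.slice_toNat data hst (by rw [htgt]; omega)]
        congr 1
        rw [htgt]; omega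
      rw [hslice]
      have hrange : pi + ((f : Int) + 1) = (pi + 1) + (f : Int) := by ring
      have hcast : pi + ((f + 1 : Nat) : Int) = pi + ((f : Int) + 1) := by push_cast; ring
      rw [hcast, hrange] at *
      rw [ih (pi + 1) _ (start + (ipp + if pi < rem then 1 else 0)) (by rw [htgt]; omega)]
      have hdrop : data.drop (start + (ipp + if pi < rem then 1 else 0)).toNat
          = (data.drop start.toNat).drop (pvTgt ipp rem pi).toNat := by
        rw [List.drop_drop]
        congr 1
        rw [htgt]; omega
      rw [hdrop]
      simp only [pvChunks, pvRk, List.append_assoc, List.cons_append, List.nil_append]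

-- B's inner function computes pvChunks
theorem pv_B_eq_chunks (data : List (Int × Int)) (n : Int) (hn : 1 ≤ n) :
    split_chunks data n
      = pvChunks (PySem.Int.floordiv (data.length : Int) n) (PySem.Int.mod (data.length : Int) n)
          n.toNat 0 data := by
  have hipp : 0 ≤ PySem.Int.floordiv (data.length : Int) n := by
    rw [PySem.Int.floordiv_eq_ediv_of_pos (by omega)]
    exact Int.ediv_nonneg (by positivity) (by omega)
  have h := pv_foldB data (PySem.Int.floordiv (data.length : Int) n)
    (PySem.Int.mod (data.length : Int) n) hipp n.toNat 0 [] 0 le_rfl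
  simp only [zero_add, Int.toNat_of_nonneg (by omega : (0:Int) ≤ n), Int.toNat_zero,
    List.drop_zero, List.nil_append] at h
  simpa only [split_chunks] using h

theorem pv_inner_eq (data : List (Int × Int)) (n : Int) (hn : 1 ≤ n) :
    split_dictionary_py data n = split_chunks data n := by
  rw [pv_A_eq_chunks data n hn, pv_B_eq_chunks data n hn]

-- ===== VERDICT (by name: the statement is the Claim_ definition above) =====
theorem split_dictionary_small_spec : Claim_equal_split_dictionary_small := by
  intro dict_list key_size _hdom hpre
  unfold Spec_split_dictionary_small split_dictionary_small split_dictionary_small_alt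
  apply PySem.List.foldl_congr_mem
  intro acc d hd
  split
  · next hlen =>
      congr 1
      rcases hpre d hd hlen with ⟨hk, hlk⟩
      apply pv_inner_eq
      rw [PySem.Int.le_floordiv_iff_mul_le (by omega)]
      omega
  · rfl
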